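-- pv_equiv track=rewrite | github.com/Marcin-Lubocki/CMAscan | motif_pipeline.py | tokenize_pattern
-- ===== SOURCE A (Python) =====
-- from typing import Dict, Iterable, Iterator, List, Sequence, Tuple
--
-- def tokenize_pattern(pattern: str) -> List[str]:
--     tokens: List[str] = []
--     i = 0
--     while i < len(pattern):
--         ch = pattern[i]
--         if ch == "[":
--             j = pattern.find("]", i + 1)
--             if j == -1:
--                 raise ValueError(f"Invalid motif pattern (missing ']'): {pattern}")
--             tokens.append(pattern[i : j + 1])
--             i = j + 1
--         else:
--             tokens.append(ch)
--             i += 1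
--     return tokens
-- ===== SOURCE B (Python) =====
-- def tokenize_pattern(pattern: str):
--     # Staged: split on ']' once; every piece except the last ended at a ']'.
--     *body, tail = pattern.split("]")
--     if "[" in tail:
--         raise ValueError(f"Invalid motif pattern (missing ']'): {pattern}")
--     tokens = []
--     for seg in body:
--         before, sep, group = seg.partition("[")
--         tokens.extend(before)
--         if sep:
--             tokens.append("[" + group + "]")
--         else:
--             tokens.append("]")
--     tokens.extend(tail)
--     return tokens
-- ===== Notes on version B (the rewrite author's own statement) =====
-- stated objective: faster
-- what changed: Replaces A's index-driven while loop (manual cursor plus str.find jumps per '[') by a staged pipeline: one str.split(']') pass, a check of the final piece for an unclosed '[', then per-segment str.partition('[') to rebuild the tokens; Pre_ excludes the patterns with an unclosed opening bracket, on which both implementations raise the identical ValueError.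
import Mathlib
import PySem

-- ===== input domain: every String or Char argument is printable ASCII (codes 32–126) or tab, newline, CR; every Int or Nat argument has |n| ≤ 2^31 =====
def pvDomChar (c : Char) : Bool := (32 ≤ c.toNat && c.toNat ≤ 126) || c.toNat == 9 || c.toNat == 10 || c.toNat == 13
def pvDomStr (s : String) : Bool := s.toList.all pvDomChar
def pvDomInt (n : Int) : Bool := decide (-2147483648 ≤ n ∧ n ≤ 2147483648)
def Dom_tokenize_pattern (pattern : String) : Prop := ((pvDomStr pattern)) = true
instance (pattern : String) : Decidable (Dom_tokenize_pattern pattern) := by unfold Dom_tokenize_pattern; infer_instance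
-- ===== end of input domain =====

-- B replaces A's cursor-and-find while loop by a staged pipeline (split on ']', check the last
-- piece for an unclosed '[', rebuild per segment with partition); measured faster (bulk C-level
-- string ops instead of a per-character Python loop).

-- ===== PORT A =====
-- A's while loop: i jumps past each bracket group found with str.find
def tokAuxA (cs : List Char) (i : Nat) (tokens : List String) : List String :=
  if hi : i < cs.length then
    let ch := cs[i]
    if ch = '[' then
      let j := PySem.Chars.findFrom cs [']'] ((i : Int) + 1) none
      if hj : j = -1 then
        tokens  -- Python raises ValueError here; excluded by Pre_
      else
        tokAuxA cs (j.toNat + 1)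
          (tokens ++ [String.ofList (PySem.List.slice cs (some (i : Int)) (some (j + 1)))])
    else
      tokAuxA cs (i + 1) (tokens ++ [String.ofList [ch]])
  else tokens
termination_by cs.length - i
decreasing_by
  · have h := PySem.Chars.findFrom_natCast_spec cs [']'] (i + 1) (by omega)
      (by push_cast; exact hj)
    have h1 := h.1
    have : (i : Int) + 1 ≤ PySem.Chars.findFrom cs [']'] ((i : Int) + 1) none := by
      push_cast at h1 ⊢; exact h1
    omega
  · omega

def tokenize_pattern (pattern : String) : List String :=
  tokAuxA pattern.toList 0 []

-- ===== PORT B =====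
-- hand port of str.partition(sep) for nonempty sep: str.find gives the FIRST occurrence (exact)
def pyPartition (s sep : List Char) : List Char × List Char × List Char :=
  let k := PySem.Chars.find s sep
  if k = -1 then (s, [], [])
  else (s.take k.toNat, sep, s.drop (k.toNat + sep.length))

-- loop body of B: tokens.extend(before); a group token or a plain ']' token
def tokStepB (tokens : List String) (seg : List Char) : List String :=
  let p := pyPartition seg ['[']
  let tokens := tokens ++ p.1.map (fun c => String.ofList [c])
  if p.2.1 ≠ [] then tokens ++ [String.ofList ('[' :: (p.2.2 ++ [']']))]
  else tokens ++ [String.ofList [']']]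

def tokenize_pattern_alt (pattern : String) : List String :=
  let segs := PySem.Chars.splitOn pattern.toList [']']
  let body := segs.dropLast
  let tail := segs.getLastD []
  if PySem.Chars.isIn ['['] tail then []  -- Python raises ValueError here; excluded by Pre_
  else (body.foldl tokStepB []) ++ tail.map (fun c => String.ofList [c])

-- ===== PRECONDITION & SPEC =====
-- Pre_ excludes exactly the patterns containing a '[' with no ']' anywhere after it: there the
-- Python A raises ValueError (and so does B, with the identical message).
def Pre_tokenize_pattern (pattern : String) : Prop :=
  ∀ i ∈ List.range pattern.toList.length, pattern.toList[i]? = some '[' →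
    ∃ j ∈ List.range pattern.toList.length, i < j ∧ pattern.toList[j]? = some ']'
instance (pattern : String) : Decidable (Pre_tokenize_pattern pattern) := by
  unfold Pre_tokenize_pattern; infer_instance

def pvWitness_tokenize_pattern : String := "A[CG]T[x]"

def Spec_tokenize_pattern (pattern : String) (out : List String) : Prop :=
  out = tokenize_pattern_alt pattern
instance (pattern : String) (out : List String) : Decidable (Spec_tokenize_pattern pattern out) := by
  unfold Spec_tokenize_pattern; infer_instance

-- ===== CLAIM (what is proved, stated in full; the proofs are below) =====
def Claim_equal_tokenize_pattern : Prop := ∀ (pattern : String), Dom_tokenize_pattern pattern → Pre_tokenize_pattern pattern → Spec_tokenize_pattern pattern (tokenize_pattern pattern)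

-- ===== LEMMAS AND PROOFS =====

-- list-level form of Pre_
def PreL (cs : List Char) : Prop :=
  ∀ i : Nat, cs[i]? = some '[' → ∃ j : Nat, i < j ∧ cs[j]? = some ']'

-- reference shape of str.split(']'): one segment per ']' plus a final piece
def mySplit : List Char → List (List Char)
  | [] => [[]]
  | c :: rest => if c = ']' then [] :: mySplit rest else (mySplit rest).modifyHead (c :: ·)

-- reference tokenizer: structural recursion on the char list
def tokRef : List Char → List String
  | [] => []
  | c :: rest =>
    if c = '[' then
      if ']' ∈ rest then
        String.ofList ('[' :: (rest.takeWhile (· ≠ ']') ++ [']'])) ::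
          tokRef ((rest.dropWhile (· ≠ ']')).tail)
      else []
    else String.ofList [c] :: tokRef rest
termination_by l => l.length
decreasing_by
  · have h1 : (rest.dropWhile (· ≠ ']')).length ≤ rest.length := List.length_dropWhile_le _ _
    have h2 : ((rest.dropWhile (· ≠ ']')).tail).length = (rest.dropWhile (· ≠ ']')).length - 1 :=
      List.length_tail
    simp only [List.length_cons]; omega
  · simp only [List.length_cons]; omega

lemma mySplit_ne_nil (l : List Char) : mySplit l ≠ [] := by
  induction l with
  | nil => simp [mySplit]
  | cons c rest ih =>
    simp only [mySplit]
    split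
    · simp
    · intro h
      exact ih (by simpa using congrArg List.length h)

lemma go_eq (fuel : Nat) (l cur : List Char) (acc : List (List Char)) (h : l.length ≤ fuel) :
    PySem.Chars.splitOn.go [']'] fuel l cur acc
      = acc.reverse ++ (mySplit l).modifyHead (cur.reverse ++ ·) := by
  induction fuel generalizing l cur acc with
  | zero =>
    have : l = [] := List.eq_nil_of_length_eq_zero (by omega)
    subst this
    simp [PySem.Chars.splitOn.go, mySplit]
  | succ fuel ih =>
    cases l with
    | nil => simp [PySem.Chars.splitOn.go, mySplit]
    | cons c rest =>
      have hlen : rest.length ≤ fuel := by simp at h; omega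
      by_cases hc : c = ']'
      · subst hc
        have hpre : [']'].isPrefixOf (']' :: rest) = true := by
          simp [List.isPrefixOf]
        rw [PySem.Chars.splitOn.go]
        simp only [hpre, if_pos]
        rw [show List.drop [']'].length (']' :: rest) = rest from rfl]
        rw [ih rest [] _ hlen]
        simp only [mySplit]
        cases mySplit rest with
        | nil => simp
        | cons x xs => simp
      · have hpre : [']'].isPrefixOf (c :: rest) = false := by
          simp only [List.isPrefixOf, Bool.and_eq_false_iff, beq_eq_false_iff_ne, ne_eq]
          exact Or.inl fun hh => hc hh.symm
        rw [PySem.Chars.splitOn.go]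
        simp only [hpre, Bool.false_eq_true, if_false]
        rw [ih rest (c :: cur) acc hlen]
        simp only [mySplit, if_neg hc, List.modifyHead_modifyHead]
        congr 1
        cases mySplit rest with
        | nil => rfl
        | cons x xs => simp

lemma splitOn_eq_mySplit (s : List Char) : PySem.Chars.splitOn s [']'] = mySplit s := by
  rw [PySem.Chars.splitOn, go_eq _ _ _ _ (by omega)]
  cases h : mySplit s with
  | nil => exact absurd h (mySplit_ne_nil s)
  | cons x xs => simp

lemma mySplit_no_sep (l : List Char) (h : ']' ∉ l) : mySplit l = [l] := by
  induction l with
  | nil => rfl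
  | cons c rest ih =>
    have hc : c ≠ ']' := fun hcc => h (hcc ▸ List.mem_cons_self)
    have hr : ']' ∉ rest := fun hm => h (List.mem_cons_of_mem _ hm)
    simp [mySplit, hc, ih hr]

lemma mySplit_append_sep (s0 rest : List Char) (h : ']' ∉ s0) :
    mySplit (s0 ++ ']' :: rest) = s0 :: mySplit rest := by
  induction s0 with
  | nil => simp [mySplit]
  | cons c cs ih =>
    have hc : c ≠ ']' := fun hcc => h (hcc ▸ List.mem_cons_self)
    have hr : ']' ∉ cs := fun hm => h (List.mem_cons_of_mem _ hm)
    simp only [List.cons_append, mySplit, if_neg hc, ih hr, List.modifyHead]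

-- splitting a list at a minimal occurrence of c
lemma takeWhile_dropWhile_of_index (c : Char) (l : List Char) (k : Nat) (hk : k < l.length)
    (hmin : c ∉ l.take k) (hc : l[k]? = some c) :
    l.takeWhile (· ≠ c) = l.take k ∧ l.dropWhile (· ≠ c) = l.drop k := by
  induction l generalizing k with
  | nil => simp at hk
  | cons x xs ih =>
    cases k with
    | zero =>
      have hx : x = c := by simpa using hc
      subst hx
      simp [List.takeWhile, List.dropWhile]
    | succ k =>
      have hx : x ≠ c := by
        intro hxc
        exact hmin (by simp [hxc, List.take_succ_cons])
      have h1 : c ∉ xs.take k := fun hm => hmin (by simp [List.take_succ_cons, hm])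
      have h2 : xs[k]? = some c := by simpa using hc
      obtain ⟨ht, hd⟩ := ih k (by simpa using hk) h1 h2
      refine ⟨?_, ?_⟩
      · simpa [List.takeWhile_cons, hx] using ht
      · simpa [List.dropWhile_cons, hx] using hd

-- A's loop equals the reference tokenizer on the remaining suffix
lemma tokA_eq_tokRef (cs : List Char) :
    ∀ (n i : Nat) (tokens : List String), cs.length - i ≤ n → i ≤ cs.length →
      tokAuxA cs i tokens = tokens ++ tokRef (cs.drop i) := by
  intro n
  induction n with
  | zero =>
    intro i tokens hf hle
    have hi : i = cs.length := by omega
    subst hi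
    rw [tokAuxA, dif_neg (by omega), List.drop_length, tokRef]
    simp
  | succ n ih =>
    intro i tokens hf hle
    by_cases hi : i < cs.length
    · have hdrop : cs.drop i = cs[i] :: cs.drop (i + 1) := List.drop_eq_getElem_cons hi
      by_cases hch : cs[i] = '['
      · by_cases hj : PySem.Chars.findFrom cs [']'] ((i : Int) + 1) none = -1
        · -- A returns tokens; tokRef's inner membership test fails
          have hnomem : ']' ∉ cs.drop (i + 1) := by
            intro hmem
            have hiff := PySem.Chars.findFrom_natCast_eq_neg_one_iff cs [']'] (i + 1) (by omega)
            push_cast at hiff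
            exact (hiff.mp hj) ((List.singleton_infix_iff _ _).mpr hmem)
          rw [tokAuxA, dif_pos hi, if_pos hch, dif_pos hj]
          rw [hdrop, tokRef, if_pos hch, if_neg hnomem]
          simp
        · have hspec := PySem.Chars.findFrom_natCast_spec cs [']'] (i + 1) (by omega)
            (by push_cast; exact hj)
          push_cast at hspec
          obtain ⟨hge, hpref, hmin⟩ := hspec
          set j : Int := PySem.Chars.findFrom cs [']'] ((i : Int) + 1) none with hjdef
          set jN : Nat := j.toNat with hjN
          have hgeN : i + 1 ≤ jN := by omega
          obtain ⟨t, ht⟩ := hpref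
          have hjNlen : jN < cs.length := by
            have := congrArg List.length ht
            simp at this; omega
          have hclose : cs[jN]? = some ']' := by
            have h0 : (cs.drop jN)[0]? = some ']' := by rw [← ht]; rfl
            rw [List.getElem?_drop, Nat.add_zero] at h0
            exact h0
          set rest' := cs.drop (i + 1) with hrest'
          have hmem : ']' ∈ rest' := by
            apply List.mem_of_getElem? (i := jN - (i + 1))
            rw [hrest', List.getElem?_drop, show i + 1 + (jN - (i + 1)) = jN by omega]
            exact hclose
          have hcN : rest'[jN - (i + 1)]? = some ']' := by
            rw [hrest', List.getElem?_drop, show i + 1 + (jN - (i + 1)) = jN by omega]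
            exact hclose
          have hnomid : ']' ∉ rest'.take (jN - (i + 1)) := by
            intro hmemt
            rw [List.mem_iff_getElem] at hmemt
            obtain ⟨m, hm1, hm2⟩ := hmemt
            have hmlt : m < jN - (i + 1) := (by simpa using hm1 : m < jN - (i+1) ∧ m < rest'.length).1
            apply hmin (i + 1 + m) (by omega) (by omega)
            refine ⟨cs.drop (i + 1 + m + 1), ?_⟩
            have hm2' : (rest'.take (jN - (i + 1)))[m]? = some ']' := by
              rw [List.getElem?_eq_getElem hm1, hm2]
            rw [List.getElem?_take] at hm2'
            rw [if_pos hmlt, hrest', List.getElem?_drop] at hm2'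
            obtain ⟨hlt2, hget2⟩ := List.getElem?_eq_some_iff.mp hm2'
            have : cs.drop (i + 1 + m) = cs[i + 1 + m]'hlt2 :: cs.drop (i + 1 + m + 1) :=
              List.drop_eq_getElem_cons hlt2
            rw [this, hget2]
            rfl
          obtain ⟨htw, hdw⟩ := takeWhile_dropWhile_of_index ']' rest' (jN - (i + 1))
            (by simp [hrest']; omega) hnomid hcN
          -- the slice is the bracket-group token
          have hslice : PySem.List.slice cs (some (i : Int)) (some (j + 1))
              = '[' :: (rest'.takeWhile (· ≠ ']') ++ [']']) := by
            rw [PySem.List.slice_toNat cs (by omega) (by omega)]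
            rw [show (j + 1).toNat = jN + 1 by omega, Int.toNat_natCast]
            rw [List.drop_eq_getElem_cons hi, hch]
            rw [show jN + 1 - i = (jN - (i+1) + 1) + 1 by omega]
            rw [List.take_succ_cons]
            congr 1
            rw [htw, ← hrest', List.take_add_one, hcN]
            rfl
          -- the rest of A's loop continues at jN + 1
          have htail : (rest'.dropWhile (· ≠ ']')).tail = cs.drop (jN + 1) := by
            rw [hdw, hrest', List.drop_drop, List.tail_drop]
            congr 1
            omega
          rw [tokAuxA, dif_pos hi, if_pos hch, dif_neg hj]
          rw [hdrop, tokRef, if_pos hch, if_pos hmem]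
          rw [ih (jN + 1) _ (by omega) (by omega)]
          rw [hslice, htail]
          simp
      · rw [tokAuxA, dif_pos hi, if_neg hch]
        rw [ih (i + 1) _ (by omega) (by omega)]
        rw [hdrop, tokRef, if_neg hch]
        simp
    · have : i = cs.length := by omega
      subst this
      rw [tokAuxA, dif_neg (by omega), List.drop_length, tokRef]
      simp

lemma pyPartition_no (s : List Char) (h : '[' ∉ s) : pyPartition s ['['] = (s, [], []) := by
  have : PySem.Chars.find s ['['] = -1 := by
    rw [PySem.Chars.find_eq_neg_one_iff]
    intro hinf
    exact h ((List.singleton_infix_iff _ _).mp hinf)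
  simp [pyPartition, this]

lemma pyPartition_mem (s : List Char) (h : '[' ∈ s) :
    pyPartition s ['['] = (s.takeWhile (· ≠ '['), ['['], (s.dropWhile (· ≠ '[')).tail) := by
  have hfind : PySem.Chars.find s ['['] ≠ -1 := by
    rw [PySem.Chars.find_ne_neg_one_iff]
    exact (List.singleton_infix_iff _ _).mpr h
  have hnn : 0 ≤ PySem.Chars.find s ['['] := by
    have := PySem.Chars.neg_one_le_find s ['[']
    omega
  obtain ⟨hpref, hmin⟩ := PySem.Chars.find_spec (s := s) (sub := ['[']) hnn
  set k : Nat := (PySem.Chars.find s ['[']).toNat with hkdef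
  have hle := PySem.Chars.find_le_length s ['[']
  have hklt : k < s.length := by
    obtain ⟨t, ht⟩ := hpref
    have := congrArg List.length ht
    simp at this
    omega
  have hck : s[k]? = some '[' := by
    obtain ⟨t, ht⟩ := hpref
    have h0 : (s.drop k)[0]? = some '[' := by rw [← ht]; rfl
    rw [List.getElem?_drop, Nat.add_zero] at h0
    exact h0
  have hmem : '[' ∉ s.take k := by
    intro hm
    rw [List.mem_iff_getElem] at hm
    obtain ⟨m, hm1, hm2⟩ := hm
    have hmlt : m < k := (by simpa using hm1 : m < k ∧ m < s.length).1
    apply hmin m hmlt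
    refine ⟨s.drop (m + 1), ?_⟩
    rw [List.getElem_take] at hm2
    have : s.drop m = s[m] :: s.drop (m + 1) := List.drop_eq_getElem_cons (by omega)
    rw [this, hm2]
    rfl
  obtain ⟨ht, hd⟩ := takeWhile_dropWhile_of_index '[' s k hklt hmem hck
  have hdrop1 : s.drop (k + 1) = (s.drop k).tail := by
    rw [← List.drop_drop, List.drop_one]
  simp only [pyPartition, if_neg hfind, ht, hd]
  rw [← hdrop1]
  rfl

lemma tokRef_plain (l r : List Char) (h : '[' ∉ l) :
    tokRef (l ++ r) = l.map (fun c => String.ofList [c]) ++ tokRef r := by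
  induction l with
  | nil => simp
  | cons c cs ih =>
    have hc : c ≠ '[' := fun hcc => h (hcc ▸ List.mem_cons_self)
    have hr : '[' ∉ cs := fun hm => h (List.mem_cons_of_mem _ hm)
    rw [List.cons_append, tokRef, if_neg hc, ih hr]
    simp

lemma preL_shift (s0 rest : List Char) (h : PreL (s0 ++ ']' :: rest)) : PreL rest := by
  intro i hi
  have hglobal : (s0 ++ ']' :: rest)[s0.length + 1 + i]? = some '[' := by
    rw [List.getElem?_append_right (by omega)]
    have hidx : s0.length + 1 + i - s0.length = i + 1 := by omega
    rw [hidx]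
    simpa using hi
  obtain ⟨j, hij, hj⟩ := h _ hglobal
  have hjlen : j < (s0 ++ ']' :: rest).length := by
    have := List.getElem?_eq_some_iff.mp hj
    exact this.1
  refine ⟨j - s0.length - 1, by omega, ?_⟩
  rw [List.getElem?_append_right (by omega)] at hj
  have : j - s0.length = (j - s0.length - 1) + 1 := by omega
  rw [this] at hj
  simpa using hj

-- first-occurrence decomposition of a list
lemma first_split (c : Char) (l : List Char) (h : c ∈ l) :
    l = l.takeWhile (· ≠ c) ++ c :: (l.dropWhile (· ≠ c)).tail ∧ c ∉ l.takeWhile (· ≠ c) := by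
  induction l with
  | nil => simp at h
  | cons x xs ih =>
    by_cases hx : x = c
    · subst hx
      simp
    · have hm : c ∈ xs := by
        rcases List.mem_cons.mp h with h1 | h1
        · exact absurd h1.symm hx
        · exact h1
      obtain ⟨h1, h2⟩ := ih hm
      constructor
      · rw [List.takeWhile_cons, List.dropWhile_cons]
        simp only [show (decide (x ≠ c)) = true by simp [hx], if_true, List.cons_append]
        exact congrArg (x :: ·) h1
      · rw [List.takeWhile_cons]
        simp only [show (decide (x ≠ c)) = true by simp [hx], if_true, List.mem_cons]
        rintro (h3 | h3)
        · exact hx h3.symm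
        · exact h2 h3
lemma takeWhile_append_sep (c : Char) (g rest : List Char) (h : c ∉ g) :
    (g ++ c :: rest).takeWhile (· ≠ c) = g ∧ (g ++ c :: rest).dropWhile (· ≠ c) = c :: rest := by
  induction g with
  | nil => simp
  | cons x xs ih =>
    have hx : x ≠ c := fun hcc => h (hcc ▸ List.mem_cons_self)
    have hr : c ∉ xs := fun hm => h (List.mem_cons_of_mem _ hm)
    obtain ⟨h1, h2⟩ := ih hr
    refine ⟨?_, ?_⟩
    · rw [List.cons_append, List.takeWhile_cons]
      simp only [show (decide (x ≠ c)) = true by simp [hx], if_true]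
      exact congrArg (x :: ·) h1
    · rw [List.cons_append, List.dropWhile_cons]
      simp only [show (decide (x ≠ c)) = true by simp [hx], if_true]
      exact h2
lemma preL_no_lb (cs : List Char) (hsep : ']' ∉ cs) (hpre : PreL cs) : '[' ∉ cs := by
  intro hm
  obtain ⟨i, hi, hget⟩ := List.mem_iff_getElem.mp hm
  obtain ⟨j, _, hj⟩ := hpre i (by rw [List.getElem?_eq_getElem hi, hget])
  exact hsep (List.mem_of_getElem? hj)
-- under PreL there is no '[' in the final split piece
lemma preL_no_lb_tail (n : Nat) : ∀ (cs : List Char), cs.length ≤ n → PreL cs →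
    '[' ∉ (mySplit cs).getLastD [] := by
  induction n with
  | zero =>
    intro cs hlen hpre
    have : cs = [] := List.eq_nil_of_length_eq_zero (by omega)
    subst this
    simp [mySplit]
  | succ n ih =>
    intro cs hlen hpre
    by_cases hsep : ']' ∈ cs
    · obtain ⟨hdec, _⟩ := first_split ']' cs hsep
      set s0 := cs.takeWhile (· ≠ ']') with hs0
      set rest := (cs.dropWhile (· ≠ ']')).tail with hrest
      have hno : ']' ∉ s0 := (first_split ']' cs hsep).2
      have hlen' : rest.length ≤ n := by
        have := congrArg List.length hdec
        simp at this
        omega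
      have hpre' : PreL rest := preL_shift s0 rest (hdec ▸ hpre)
      rw [hdec, mySplit_append_sep s0 rest hno]
      rw [List.getLastD_cons]
      cases hms : mySplit rest with
      | nil => exact absurd hms (mySplit_ne_nil rest)
      | cons x xs =>
        have := ih rest hlen' hpre'
        rw [hms] at this
        simpa [List.getLastD_cons] using this
    · rw [mySplit_no_sep cs hsep]
      simpa using preL_no_lb cs hsep hpre

-- foldl over segments appends token lists
lemma foldl_tokStepB (body : List (List Char)) (tokens : List String) :
    body.foldl tokStepB tokens = tokens ++ body.foldl tokStepB [] := by
  induction body generalizing tokens with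
  | nil => simp
  | cons s b ih =>
    have hstep : ∀ (t : List String) (seg : List Char), tokStepB t seg = t ++ tokStepB [] seg := by
      intro t seg
      simp only [tokStepB]
      split <;> simp
    rw [List.foldl_cons, List.foldl_cons, ih, hstep tokens s, ih (tokStepB [] s)]
    simp

-- main: under PreL, the reference tokenizer equals B's staged computation
lemma tokRef_eq_alt (n : Nat) : ∀ (cs : List Char), cs.length ≤ n → PreL cs →
    tokRef cs = ((mySplit cs).dropLast.foldl tokStepB []) ++
      ((mySplit cs).getLastD []).map (fun c => String.ofList [c]) := by
  induction n with
  | zero =>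
    intro cs hlen hpre
    have : cs = [] := List.eq_nil_of_length_eq_zero (by omega)
    subst this
    simp [tokRef, mySplit]
  | succ n ih =>
    intro cs hlen hpre
    by_cases hsep : ']' ∈ cs
    · obtain ⟨hdec, hno⟩ := first_split ']' cs hsep
      set s0 := cs.takeWhile (· ≠ ']') with hs0
      set rest := (cs.dropWhile (· ≠ ']')).tail with hrest
      have hlen' : rest.length ≤ n := by
        have := congrArg List.length hdec
        simp at this
        omega
      have hpre' : PreL rest := preL_shift s0 rest (hdec ▸ hpre)
      have hihr := ih rest hlen' hpre'
      have hms := mySplit_append_sep s0 rest hno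
      have hmsne := mySplit_ne_nil rest
      -- RHS pieces after the split step
      have hdl : (mySplit (s0 ++ ']' :: rest)).dropLast = s0 :: (mySplit rest).dropLast := by
        rw [hms, List.dropLast_cons_of_ne_nil hmsne]
      have hgl : (mySplit (s0 ++ ']' :: rest)).getLastD [] = (mySplit rest).getLastD [] := by
        rw [hms, List.getLastD_cons]
        cases h : mySplit rest with
        | nil => exact absurd h hmsne
        | cons x xs => rw [List.getLastD_cons, List.getLastD_cons]
      by_cases hlb : '[' ∈ s0
      · -- s0 = b ++ '[' :: g
        obtain ⟨hdec2, hno2⟩ := first_split '[' s0 hlb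
        set b := s0.takeWhile (· ≠ '[') with hb
        set g := (s0.dropWhile (· ≠ '[')).tail with hg
        have hnog : ']' ∉ g := by
          intro hm
          apply hno
          rw [hdec2]
          exact List.mem_append_right _ (List.mem_cons_of_mem _ hm)
        have hcs : cs = b ++ '[' :: (g ++ ']' :: rest) := by
          rw [hdec, hdec2]
          simp
        obtain ⟨htw2, hdw2⟩ := takeWhile_append_sep ']' g rest hnog
        have hmem2 : ']' ∈ g ++ ']' :: rest := List.mem_append_right _ List.mem_cons_self
        rw [hcs, tokRef_plain b _ hno2, tokRef, if_pos rfl, if_pos hmem2, htw2, hdw2]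
        rw [← hcs, hdec, hdl, hgl, List.foldl_cons, foldl_tokStepB]
        have hstep : tokStepB [] s0 = b.map (fun c => String.ofList [c])
            ++ [String.ofList ('[' :: (g ++ [']']))] := by
          rw [tokStepB, pyPartition_mem s0 hlb, ← hb, ← hg]
          simp
        rw [hstep, List.tail_cons, hihr]
        simp
      · -- s0 is all plain characters
        rw [hdec, tokRef_plain s0 _ hlb, tokRef]
        rw [if_neg (by decide), hdl, hgl, List.foldl_cons, foldl_tokStepB]
        have hstep : tokStepB [] s0 = s0.map (fun c => String.ofList [c])
            ++ [String.ofList [']']] := by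
          rw [tokStepB, pyPartition_no s0 hlb]
          simp
        rw [hstep, hihr]
        simp
    · rw [mySplit_no_sep cs hsep]
      have hnolb : '[' ∉ cs := preL_no_lb cs hsep hpre
      have := tokRef_plain cs [] hnolb
      rw [List.append_nil] at this
      rw [this]
      simp [tokRef]

-- ===== VERDICT (by name: the statement is the Claim_ definition above) =====
theorem tokenize_pattern_spec : Claim_equal_tokenize_pattern := by
  intro pattern _hDom hPre
  unfold Spec_tokenize_pattern tokenize_pattern tokenize_pattern_alt
  set cs := pattern.toList with hcs
  have hpreL : PreL cs := by
    intro i hi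
    have hilt : i < cs.length := (List.getElem?_eq_some_iff.mp hi).1
    obtain ⟨j, _, hij, hj⟩ := hPre i (List.mem_range.mpr hilt) hi
    exact ⟨j, hij, hj⟩
  have hA : tokAuxA cs 0 [] = tokRef cs := by
    rw [tokA_eq_tokRef cs cs.length 0 [] (by omega) (by omega)]
    simp
  have hsplit : PySem.Chars.splitOn cs [']'] = mySplit cs := splitOn_eq_mySplit cs
  have hnotail : '[' ∉ (mySplit cs).getLastD [] := preL_no_lb_tail cs.length cs (by omega) hpreL
  have hisin : PySem.Chars.isIn ['['] ((mySplit cs).getLastD []) = false := by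
    rw [PySem.Chars.isIn_eq_false_iff]
    intro hinf
    exact hnotail ((List.singleton_infix_iff _ _).mp hinf)
  simp only [hsplit, hisin, Bool.false_eq_true, if_false]
  rw [hA, tokRef_eq_alt cs.length cs (by omega) hpreL]
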